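-- pv_equiv track=rewrite | github.com/AdamZhouSE/pythonHomework | Code/CodeRecords/2245/60696/280587.py | solve
-- ===== SOURCE A (Python) =====
-- def solve(n):
--     p = -1
--     q = -1
--     turn = 0
--     res = 0
--     for i in range(31):
--         if (n & (1<<i)) != 0:
--             if turn == 0:
--                 p = i + 1
--                 turn = 1
--                 if q != -1:
--                     res = max(res, p - q)
--             else:
--                 q = i + 1
--                 turn = 0
--                 res = max(res, q - p)
--     return res
-- ===== SOURCE B (Python) =====
-- def solve(n):
--     positions = [i for i in range(31) if n & (1 << i)]
--     gaps = [b - a for a, b in zip(positions, positions[1:])]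
--     return max(gaps, default=0)
-- ===== Notes on version B (the rewrite author's own statement) =====
-- stated objective: simpler
-- what changed: A's p/q/turn alternating state machine is replaced by two plain passes: collect the set-bit positions of bits 0..30, then take the max of consecutive differences with default 0.
import Mathlib
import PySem

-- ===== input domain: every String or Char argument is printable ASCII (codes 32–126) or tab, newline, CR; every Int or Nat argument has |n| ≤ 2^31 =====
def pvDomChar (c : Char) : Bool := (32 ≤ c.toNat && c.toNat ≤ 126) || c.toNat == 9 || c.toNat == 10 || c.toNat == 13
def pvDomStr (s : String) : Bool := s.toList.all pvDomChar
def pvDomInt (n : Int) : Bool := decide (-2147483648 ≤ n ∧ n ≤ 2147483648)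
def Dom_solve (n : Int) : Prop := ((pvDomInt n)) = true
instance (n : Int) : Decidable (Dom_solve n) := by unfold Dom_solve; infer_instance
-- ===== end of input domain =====

-- B replaces A's p/q/turn alternating state machine by "collect set-bit positions, then take
-- the max of consecutive differences" (objective: simpler; same O(1) cost over 31 bits).

-- ===== PORT A =====
-- body of A's 'if (n & (1<<i)) != 0' branch, on state (p, q, turn, res)
def pvStepBody (s : Int × Int × Int × Int) (i : Int) : Int × Int × Int × Int :=
  if s.2.2.1 = 0 then
    (i + 1, s.2.1, 1, if s.2.1 ≠ -1 then max s.2.2.2 ((i + 1) - s.2.1) else s.2.2.2)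
  else
    (s.1, i + 1, 0, max s.2.2.2 ((i + 1) - s.1))

def solve (n : Int) : Int :=
  ((PySem.List.pyRange 0 31 1).foldl
    (fun s i => if (PySem.Int.band n ((1 : Int) <<< i.toNat)) != 0 then pvStepBody s i else s)
    (-1, -1, 0, 0)).2.2.2

-- ===== PORT B =====
def solve_alt (n : Int) : Int :=
  let positions := (PySem.List.pyRange 0 31 1).filter
      (fun i => (PySem.Int.band n ((1 : Int) <<< i.toNat)) != 0)
  let gaps := List.zipWith (fun a b => b - a) positions (PySem.List.slice positions (some 1) none)
  PySem.List.maxD gaps (fun x => x) 0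

-- ===== PRECONDITION & SPEC =====
def Spec_solve (n : Int) (out : Int) : Prop := out = solve_alt n
instance (n : Int) (out : Int) : Decidable (Spec_solve n out) := by unfold Spec_solve; infer_instance

-- ===== CLAIM (what is proved, stated in full; the proofs are below) =====
def Claim_equal_solve : Prop := ∀ (n : Int), Dom_solve n → Spec_solve n (solve n)

-- ===== LEMMAS AND PROOFS =====

-- loop invariant for A's state machine over the list of set-bit positions: once one position
-- 'last' has been absorbed (turn alternating, current slot = last + 1), the rest of the fold
-- accumulates exactly the running max of the consecutive differences.
lemma pvLoopA (ps : List Int) : ∀ (last res p q t : Int),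
    List.Pairwise (· < ·) (last :: ps) → 0 ≤ last → (t = 0 ∨ t = 1) →
    (if t = 0 then q else p) = last + 1 →
    (List.foldl pvStepBody (p, q, t, res) ps).2.2.2
      = List.foldl max res (List.zipWith (fun a b => b - a) (last :: ps) ps) := by
  induction ps with
  | nil => intro last res p q t _ _ _ _; simp
  | cons x xs ih =>
    intro last res p q t hpw hlast ht hcur
    rcases List.pairwise_cons.mp hpw with ⟨hrel, hpw'⟩
    have hlt : last < x := hrel x (by simp)
    rcases ht with ht | ht
    · subst ht
      have hcur' : q = last + 1 := by simpa using hcur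
      have hq : q ≠ -1 := by omega
      have hstep : pvStepBody (p, q, 0, res) x = (x + 1, q, 1, max res (x + 1 - q)) := by
        simp [pvStepBody, hq]
      rw [List.foldl_cons, hstep, List.zipWith_cons_cons, List.foldl_cons,
        ih x (max res (x + 1 - q)) (x + 1) q 1 hpw' (by omega) (Or.inr rfl) (by simp), hcur']
      ring_nf
    · subst ht
      have hcur' : p = last + 1 := by simpa using hcur
      have hstep : pvStepBody (p, q, 1, res) x = (p, x + 1, 0, max res (x + 1 - p)) := by
        simp [pvStepBody]
      rw [List.foldl_cons, hstep, List.zipWith_cons_cons, List.foldl_cons,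
        ih x (max res (x + 1 - p)) p (x + 1) 0 hpw' (by omega) (Or.inl rfl) (by simp), hcur']
      ring_nf

lemma pvPositionsPairwise (n : Int) :
    ((PySem.List.pyRange 0 31 1).filter
        (fun i => (PySem.Int.band n ((1 : Int) <<< i.toNat)) != 0)).Pairwise (· < ·) := by
  apply List.Pairwise.filter
  decide

lemma pvPositionsNonneg (n : Int) :
    ∀ y ∈ (PySem.List.pyRange 0 31 1).filter
        (fun i => (PySem.Int.band n ((1 : Int) <<< i.toNat)) != 0), (0:Int) ≤ y := by
  intro y hy
  exact (PySem.List.mem_pyRange_one.mp (List.mem_of_mem_filter hy)).1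

-- ===== VERDICT (by name: the statement is the Claim_ definition above) =====
theorem solve_spec : Claim_equal_solve := by
  intro n _
  unfold Spec_solve solve solve_alt
  simp only [PySem.List.slice_from_one]
  rw [PySem.List.foldl_if_eq_foldl_filter]
  have hpw := pvPositionsPairwise n
  have hnn := pvPositionsNonneg n
  cases hpos : (PySem.List.pyRange 0 31 1).filter
      (fun i => (PySem.Int.band n ((1 : Int) <<< i.toNat)) != 0) with
  | nil => simp [PySem.List.maxD, PySem.List.max?]
  | cons x rest =>
    rw [hpos] at hpw hnn
    have hx : (0:Int) ≤ x := hnn x (by simp)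
    have hfirst : List.foldl pvStepBody ((-1 : Int), (-1 : Int), (0 : Int), (0 : Int)) (x :: rest)
        = List.foldl pvStepBody (x + 1, -1, 1, 0) rest := by
      simp [pvStepBody]
    rw [hfirst, pvLoopA rest x 0 (x + 1) (-1) 1 hpw hx (Or.inr rfl) (by simp)]
    cases rest with
    | nil => simp [PySem.List.maxD, PySem.List.max?]
    | cons y ys =>
      have hxy : x < y := (List.pairwise_cons.mp hpw).1 y (by simp)
      simp only [List.tail_cons, List.zipWith_cons_cons, List.foldl_cons,
        PySem.List.maxD, PySem.List.max?_id_cons]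
      rw [max_eq_right (by omega : (0:Int) ≤ y - x)]
      simp
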